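-- pv_equiv track=rewrite | github.com/transientlunatic/running | running_results/importers.py | _detect_delimiter
-- ===== SOURCE A (Python) =====
-- def _detect_delimiter(text: str) -> str:
--     """Auto-detect delimiter in text."""
--     # Sample first few lines
--     lines = text.split('\n')[:5]
--     sample = '\n'.join(lines)
--
--     # Try common delimiters
--     delimiters = [',', '\t', '|', ';', ' ']
--
--     for delim in delimiters:
--         # Count occurrences in each line
--         counts = [line.count(delim) for line in lines if line.strip()]
--         if counts and all(c == counts[0] and c > 0 for c in counts):
--             return delim
--
--     # Default to whitespace
--     return r'\s+'
-- ===== SOURCE B (Python) =====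
-- def _detect_delimiter(text: str) -> str:
--     """Auto-detect delimiter in text (one pass over the sampled lines)."""
--     delims = [',', '\t', '|', ';', ' ']
--     # state: delim -> (count seen on first non-empty line, still-uniform flag)
--     state = {}
--     for line in text.split('\n')[:5]:
--         if not line.strip():
--             continue
--         for d in delims:
--             c = line.count(d)
--             if d not in state:
--                 state[d] = (c, True)
--             else:
--                 first, ok = state[d]
--                 state[d] = (first, ok and c == first)
--     for d in delims:
--         if d in state:
--             first, ok = state[d]
--             if ok and first > 0:
--                 return d
--     return r'\s+'
-- ===== Notes on version B (the rewrite author's own statement) =====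
-- stated objective: alternative
-- what changed: B replaces A's delimiter-outer loop (which rescans all sampled lines once per candidate) by a single pass over the sampled lines that incrementally maintains, in a dict, each delimiter's first-line count and a still-uniform flag, followed by one priority-order readout of that table.
import Mathlib
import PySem

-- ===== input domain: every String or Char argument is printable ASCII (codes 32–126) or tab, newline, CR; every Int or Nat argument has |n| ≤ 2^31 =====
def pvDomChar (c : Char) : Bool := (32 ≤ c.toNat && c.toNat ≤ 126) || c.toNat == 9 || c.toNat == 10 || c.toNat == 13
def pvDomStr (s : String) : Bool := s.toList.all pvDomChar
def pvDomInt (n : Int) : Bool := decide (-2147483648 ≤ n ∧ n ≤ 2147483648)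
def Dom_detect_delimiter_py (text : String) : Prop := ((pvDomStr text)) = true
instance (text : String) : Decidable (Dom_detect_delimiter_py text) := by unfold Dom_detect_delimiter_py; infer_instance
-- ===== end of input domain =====

-- B replaces A's per-delimiter rescans of the sampled lines by one pass over the lines
-- maintaining a dict delim -> (first count, uniform flag), then a priority-order readout (alternative decomposition).


def pvDelims : List String := [",", "\t", "|", ";", " "]

-- ===== PORT A =====
-- counts = [line.count(delim) for line in lines if line.strip()]; counts and all(c == counts[0] and c > 0 for c in counts)
def pvCheckA (lines : List String) (d : String) : Bool :=
  match (lines.filter (fun l => PySem.Str.strip l != "")).map (fun l => PySem.Str.count l d) with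
  | [] => false
  | c0 :: rest => (c0 :: rest).all (fun c => c == c0 && decide (0 < c))

def pvLoopA (lines : List String) : List String → String
  | [] => "\\s+"
  | d :: ds => if pvCheckA lines d then d else pvLoopA lines ds

def detect_delimiter_py (text : String) : String :=
  pvLoopA (((PySem.Str.split? text "\n").getD []).take 5) pvDelims

-- ===== PORT B =====
-- state update for one delimiter: the first non-empty line records (c, True), later lines conjoin the uniform flag
def pvNext (o : Option (Nat × Bool)) (c : Nat) : Nat × Bool :=
  match o with
  | none => (c, true)
  | some (first, ok) => (first, ok && c == first)

-- one line of B's single pass: skip blank lines, else update every delimiter's entry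
def pvStepB (st : PySem.Dict String (Nat × Bool)) (line : String) : PySem.Dict String (Nat × Bool) :=
  if PySem.Str.strip line == "" then st
  else pvDelims.foldl (fun st d => st.insert d (pvNext (st.get? d) (PySem.Str.count line d))) st

-- priority-order readout of the table
def pvPickB (st : PySem.Dict String (Nat × Bool)) : List String → String
  | [] => "\\s+"
  | d :: ds =>
    match st.get? d with
    | some (first, ok) => if ok && decide (0 < first) then d else pvPickB st ds
    | none => pvPickB st ds

def detect_delimiter_py_alt (text : String) : String :=
  pvPickB ((((PySem.Str.split? text "\n").getD []).take 5).foldl pvStepB PySem.Dict.empty) pvDelims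

-- ===== PRECONDITION & SPEC =====
def Spec_detect_delimiter_py (text : String) (out : String) : Prop := out = detect_delimiter_py_alt text
instance (text : String) (out : String) : Decidable (Spec_detect_delimiter_py text out) := by unfold Spec_detect_delimiter_py; infer_instance

-- ===== CLAIM (what is proved, stated in full; the proofs are below) =====
def Claim_equal_detect_delimiter_py : Prop := ∀ (text : String), Dom_detect_delimiter_py text → Spec_detect_delimiter_py text (detect_delimiter_py text)

-- ===== LEMMAS AND PROOFS =====

-- a key not in the delimiter list is untouched by one line's inner fold
theorem pv_get_foldl_not_mem (ds : List String) (st : PySem.Dict String (Nat × Bool))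
    (cnt : String → Nat) (d : String) (hd : d ∉ ds) :
    (ds.foldl (fun st d => st.insert d (pvNext (st.get? d) (cnt d))) st).get? d = st.get? d := by
  induction ds generalizing st with
  | nil => rfl
  | cons e es ih =>
    simp only [List.mem_cons, not_or] at hd
    simp only [List.foldl_cons]
    rw [ih _ hd.2, PySem.Dict.get?_insert_of_ne _ _ hd.1]

-- what one line's inner fold does to a key of the delimiter list
theorem pv_get_foldl_line (ds : List String) (hnd : ds.Nodup) (st : PySem.Dict String (Nat × Bool))
    (cnt : String → Nat) (d : String) :
    (ds.foldl (fun st d => st.insert d (pvNext (st.get? d) (cnt d))) st).get? d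
      = if d ∈ ds then some (pvNext (st.get? d) (cnt d)) else st.get? d := by
  induction ds generalizing st with
  | nil => rfl
  | cons e es ih =>
    rcases List.nodup_cons.mp hnd with ⟨he, hes⟩
    simp only [List.foldl_cons]
    by_cases hde : d = e
    · subst hde
      rw [pv_get_foldl_not_mem es _ cnt d he, PySem.Dict.get?_insert_self]
      simp
    · rw [ih hes, PySem.Dict.get?_insert_of_ne _ _ hde]
      simp [hde]

-- the whole pass, projected to one delimiter, is a fold of pvNext over that delimiter's per-line counts
theorem pv_get_pass (lines : List String) (st : PySem.Dict String (Nat × Bool)) (d : String)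
    (hd : d ∈ pvDelims) :
    (lines.foldl pvStepB st).get? d
      = (((lines.filter (fun l => PySem.Str.strip l != "")).map
            (fun l => PySem.Str.count l d)).foldl (fun o c => some (pvNext o c)) (st.get? d)) := by
  induction lines generalizing st with
  | nil => rfl
  | cons l ls ih =>
    simp only [List.foldl_cons, List.filter_cons]
    by_cases hl : PySem.Str.strip l == ""
    · have : (PySem.Str.strip l != "") = false := by simp_all
      rw [this]
      simp only [pvStepB, hl]
      exact ih st
    · have : (PySem.Str.strip l != "") = true := by simp_all
      rw [this]
      simp only [pvStepB, hl]
      rw [if_neg (by simp_all), ih]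
      rw [pv_get_foldl_line pvDelims (by decide) st (fun e => PySem.Str.count l e) d, if_pos hd]
      simp

-- the pvNext-fold started at 'some (f, b)' keeps f and conjoins uniformity
theorem pv_fold_some (cs : List Nat) (f : Nat) (b : Bool) :
    cs.foldl (fun o c => some (pvNext o c)) (some (f, b)) = some (f, b && cs.all (fun c => c == f)) := by
  induction cs generalizing b with
  | nil => simp
  | cons c cs ih =>
    rw [List.foldl_cons]
    show cs.foldl (fun o c => some (pvNext o c)) (some (f, b && (c == f))) = _
    rw [ih, List.all_cons, Bool.and_assoc]

theorem pv_fold_none (cs : List Nat) :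
    cs.foldl (fun o c => some (pvNext o c)) none
      = match cs with
        | [] => none
        | c0 :: rest => some (c0, rest.all (fun c => c == c0)) := by
  cases cs with
  | nil => rfl
  | cons c0 rest =>
    rw [List.foldl_cons]
    show rest.foldl (fun o c => some (pvNext o c)) (some (c0, true)) = _
    rw [pv_fold_some, Bool.true_and]

-- with a positive first count, 'c == c0 and c > 0' collapses to 'c == c0' on the tail
theorem pv_tail_eq (c0 : Nat) (h : 0 < c0) (rest : List Nat) :
    rest.all (fun c => c == c0 && decide (0 < c)) = rest.all (fun c => c == c0) := by
  induction rest with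
  | nil => rfl
  | cons c cs ih =>
    simp only [List.all_cons, ih]
    by_cases hc : c = c0
    · subst hc; simp [h]
    · have hb : (c == c0) = false := beq_eq_false_iff_ne.mpr hc
      rw [hb]
      simp

-- A's test over the whole counts list equals B's (uniform-tail, first > 0) test
theorem pv_test_eq (c0 : Nat) (rest : List Nat) :
    (c0 :: rest).all (fun c => c == c0 && decide (0 < c))
      = (rest.all (fun c => c == c0) && decide (0 < c0)) := by
  by_cases h0 : 0 < c0
  · simp only [List.all_cons, pv_tail_eq c0 h0 rest]
    simp [h0, Bool.and_comm]
  · have hz : c0 = 0 := by omega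
    subst hz
    simp

-- the two loops agree on any sublist of pvDelims
theorem pv_loops_eq (lines : List String) (ds : List String) (hds : ∀ d ∈ ds, d ∈ pvDelims) :
    pvLoopA lines ds = pvPickB (lines.foldl pvStepB PySem.Dict.empty) ds := by
  induction ds with
  | nil => rfl
  | cons d es ih =>
    have hd : d ∈ pvDelims := hds d (by simp)
    have htail : ∀ e ∈ es, e ∈ pvDelims := fun e he => hds e (by simp [he])
    have hget := pv_get_pass lines PySem.Dict.empty d hd
    rw [PySem.Dict.get?_empty, pv_fold_none] at hget
    simp only [pvLoopA, pvPickB]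
    cases hcs : (lines.filter (fun l => PySem.Str.strip l != "")).map (fun l => PySem.Str.count l d) with
    | nil =>
      rw [hcs] at hget
      simp only at hget
      rw [hget]
      have hA : pvCheckA lines d = false := by
        unfold pvCheckA
        rw [hcs]
      rw [hA]
      simp only [if_neg Bool.false_ne_true]
      exact ih htail
    | cons c0 rest =>
      rw [hcs] at hget
      simp only at hget
      rw [hget]
      have hA : pvCheckA lines d = (rest.all (fun c => c == c0) && decide (0 < c0)) := by
        unfold pvCheckA
        rw [hcs]
        exact pv_test_eq c0 rest
      show (if pvCheckA lines d = true then d else pvLoopA lines es)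
            = (if ((rest.all fun c => c == c0) && decide (0 < c0)) = true then d
               else pvPickB (List.foldl pvStepB PySem.Dict.empty lines) es)
      rw [hA]
      by_cases hb : (rest.all (fun c => c == c0) && decide (0 < c0)) = true
      · rw [if_pos hb, if_pos hb]
      · rw [if_neg hb, if_neg hb]
        exact ih htail

-- ===== VERDICT (by name: the statement is the Claim_ definition above) =====
theorem detect_delimiter_py_spec : Claim_equal_detect_delimiter_py := by
  intro text _
  unfold Spec_detect_delimiter_py detect_delimiter_py detect_delimiter_py_alt
  exact pv_loops_eq _ pvDelims (fun d hd => hd)
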